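-- pv_equiv track=rewrite | github.com/MendaciousQuark/quoridor-drl-reward-shaping | src/graphing/shared_flags.py | count_shared_flags
-- ===== SOURCE A (Python) =====
-- from collections import defaultdict, Counter
--
-- def count_shared_flags(generation_data, min_shared=2):
--     shared_counts = {}
--     for generation, colors in generation_data.items():
--         shared_counts[generation] = {}
--         for color, agents_flags in colors.items():
--             shared_agents = 0
--             flag_count = Counter(len(v) for v in agents_flags.values())
--             for agent_count, num_agents in flag_count.items():
--                 if agent_count >= min_shared:
--                     shared_agents += num_agents
--             shared_counts[generation][color] = shared_agents
--     return shared_counts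
-- ===== SOURCE B (Python) =====
-- def count_shared_flags(generation_data, min_shared=2):
--     def shared(agents_flags):
--         # sort the flag-list sizes largest-first; the qualifying agents form a
--         # prefix, so count until the first size below the threshold and stop.
--         shared_agents = 0
--         for n in sorted((len(v) for v in agents_flags.values()), reverse=True):
--             if n < min_shared:
--                 break
--             shared_agents += 1
--         return shared_agents
--
--     return {generation: {color: shared(agents_flags)
--                          for color, agents_flags in colors.items()}
--             for generation, colors in generation_data.items()}
-- ===== Notes on version B (the rewrite author's own statement) =====
-- stated objective: alternative
-- what changed: Replaced A's per-color build-a-Counter-histogram-of-lengths-then-sum-qualifying-buckets computation by sorting the flag-list sizes in descending order and counting the qualifying prefix with an early break at the first size below the threshold; the histogram table disappears and the outer dicts are built by comprehension.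
import Mathlib
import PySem

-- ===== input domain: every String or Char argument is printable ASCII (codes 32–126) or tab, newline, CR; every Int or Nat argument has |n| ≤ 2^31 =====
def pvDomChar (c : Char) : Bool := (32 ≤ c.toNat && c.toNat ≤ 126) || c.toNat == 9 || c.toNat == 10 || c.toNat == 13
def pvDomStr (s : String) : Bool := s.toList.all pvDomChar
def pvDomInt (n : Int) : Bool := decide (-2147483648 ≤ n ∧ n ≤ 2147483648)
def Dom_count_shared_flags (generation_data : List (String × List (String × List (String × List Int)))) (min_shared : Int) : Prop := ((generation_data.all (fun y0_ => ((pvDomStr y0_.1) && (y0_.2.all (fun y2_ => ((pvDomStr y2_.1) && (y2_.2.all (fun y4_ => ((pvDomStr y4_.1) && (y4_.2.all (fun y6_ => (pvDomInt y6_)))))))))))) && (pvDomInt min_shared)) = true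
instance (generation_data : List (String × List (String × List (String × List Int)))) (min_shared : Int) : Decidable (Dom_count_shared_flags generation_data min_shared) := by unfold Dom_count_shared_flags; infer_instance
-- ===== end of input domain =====

-- B replaces A's per-color Counter histogram (then summing qualifying buckets) by sorting the
-- flag-list sizes descending and counting the qualifying prefix (early break); objective: alternative.


-- ===== PORT A =====
-- for generation, colors: build shared_counts[generation] as the inner dict; dict keys are unique
-- in Python, so iterating .items() is iterating the association list and the insertions append.
def count_shared_flags (generation_data : List (String × List (String × List (String × List Int)))) (min_shared : Int) : List (String × List (String × Int)) :=
  generation_data.foldl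
    (fun shared_counts gc =>
      shared_counts ++
        [(gc.1,
          gc.2.foldl
            (fun inner ca =>
              -- flag_count = Counter(len(v) for v in agents_flags.values())
              let flag_count := PySem.Dict.counter (ca.2.map (fun p => PySem.List.len p.2))
              -- for agent_count, num_agents in flag_count.items(): if agent_count >= min_shared: shared_agents += num_agents
              let shared_agents :=
                flag_count.items.foldl
                  (fun s kv => if min_shared ≤ kv.1 then s + kv.2 else s) 0
              inner ++ [(ca.1, shared_agents)])
            [])]) []

-- ===== PORT B =====
-- the 'for n in sorted(..., reverse=True): if n < min_shared: break; shared_agents += 1' loop: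
-- structural recursion on the sorted list, stopping at the first element below the threshold.
def pvPrefixCount (min_shared : Int) : List Int → Int
  | [] => 0
  | n :: rest => if n < min_shared then 0 else pvPrefixCount min_shared rest + 1

-- shared(agents_flags): sort the sizes largest-first, count the qualifying prefix
def pvShared (min_shared : Int) (agents_flags : List (String × List Int)) : Int :=
  pvPrefixCount min_shared
    (PySem.List.sorted (agents_flags.map (fun v => PySem.List.len v.2)) (fun x => x) true)

-- nested dict comprehension over generations and colors
def count_shared_flags_alt (generation_data : List (String × List (String × List (String × List Int)))) (min_shared : Int) : List (String × List (String × Int)) :=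
  generation_data.map
    (fun gc => (gc.1, gc.2.map (fun ca => (ca.1, pvShared min_shared ca.2))))

-- ===== PRECONDITION & SPEC =====
def Spec_count_shared_flags (generation_data : List (String × List (String × List (String × List Int)))) (min_shared : Int) (out : List (String × List (String × Int))) : Prop := out = count_shared_flags_alt generation_data min_shared
instance (generation_data : List (String × List (String × List (String × List Int)))) (min_shared : Int) (out : List (String × List (String × Int))) : Decidable (Spec_count_shared_flags generation_data min_shared out) := by unfold Spec_count_shared_flags; infer_instance

-- ===== CLAIM (what is proved, stated in full; the proofs are below) =====
def Claim_equal_count_shared_flags : Prop := ∀ (generation_data : List (String × List (String × List (String × List Int)))) (min_shared : Int), Dom_count_shared_flags generation_data min_shared → Spec_count_shared_flags generation_data min_shared (count_shared_flags generation_data min_shared)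

-- ===== LEMMAS AND PROOFS =====

-- summing a single indicator over a nodup list containing x yields the value at x
theorem sum_map_single_indicator (S : List Int) (x : Int) (c : Int)
    (hnd : S.Nodup) (hx : x ∈ S) :
    (S.map (fun k => if k = x then c else 0)).sum = c := by
  induction S with
  | nil => cases hx
  | cons s S' ih =>
    rcases List.nodup_cons.mp hnd with ⟨hns, hnd'⟩
    rcases List.mem_cons.mp hx with h | h
    · have hz : (S'.map (fun k => if k = x then c else 0)).sum = 0 := by
        apply List.sum_eq_zero
        intro y hy
        rcases List.mem_map.mp hy with ⟨k, hk, rfl⟩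
        exact if_neg (fun he => hns (by rw [← h, ← he]; exact hk))
      simp [← h, hz]
    · have hsx : s ≠ x := fun he => hns (he ▸ h)
      simp only [List.map_cons, List.sum_cons, if_neg hsx, zero_add]
      exact ih hnd' h

-- summing counts of a nodup key superset, filtered by the threshold, is the direct filtered count
theorem sum_counts_eq_countP (L : List Int) (m : Int) (S : List Int)
    (hnd : S.Nodup) (hmem : ∀ x ∈ L, x ∈ S) :
    (S.map (fun k => if m ≤ k then (L.count k : Int) else 0)).sum
      = ((L.countP (fun x => m ≤ x) : Nat) : Int) := by
  induction L with
  | nil => simp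
  | cons x L' ih =>
    have hxS : x ∈ S := hmem x (List.mem_cons_self)
    have hmem' : ∀ y ∈ L', y ∈ S := fun y hy => hmem y (List.mem_cons_of_mem _ hy)
    have hsplit : ∀ k : Int,
        (if m ≤ k then ((x :: L').count k : Int) else 0)
          = (if m ≤ k then (L'.count k : Int) else 0)
            + (if k = x then (if m ≤ x then (1 : Int) else 0) else 0) := by
      intro k
      by_cases hkx : k = x
      · subst hkx
        by_cases hm : m ≤ k <;> simp [hm]
      · have hxk : ¬ x = k := fun h => hkx h.symm
        by_cases hm : m ≤ k
        · simp [hkx, hxk, hm]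
        · simp [hkx, hxk, hm]
    calc (S.map (fun k => if m ≤ k then ((x :: L').count k : Int) else 0)).sum
        = (S.map (fun k => (if m ≤ k then (L'.count k : Int) else 0)
            + (if k = x then (if m ≤ x then (1 : Int) else 0) else 0))).sum := by
          exact congrArg List.sum (List.map_congr_left (fun k _ => hsplit k))
      _ = (S.map (fun k => if m ≤ k then (L'.count k : Int) else 0)).sum
            + (S.map (fun k => if k = x then (if m ≤ x then (1 : Int) else 0) else 0)).sum := by
          exact PySem.List.sum_map_add_int S _ _
      _ = ((L'.countP (fun x => m ≤ x) : Nat) : Int)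
            + (if m ≤ x then (1 : Int) else 0) := by
          rw [ih hmem', sum_map_single_indicator S x _ hnd hxS]
      _ = (((x :: L').countP (fun x => m ≤ x) : Nat) : Int) := by
          by_cases hm : m ≤ x <;> simp [hm]

-- the inner Counter loop of A computes the direct filtered count
theorem counter_loop_eq_countP (L : List Int) (m : Int) :
    ((PySem.Dict.counter L).items.foldl
        (fun s kv => if m ≤ kv.1 then s + kv.2 else s) 0)
      = ((L.countP (fun x => m ≤ x) : Nat) : Int) := by
  have hfold : ∀ (l : List (Int × Int)) (s0 : Int),
      l.foldl (fun s kv => if m ≤ kv.1 then s + kv.2 else s) s0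
        = s0 + (l.map (fun kv => if m ≤ kv.1 then kv.2 else 0)).sum := by
    intro l
    induction l with
    | nil => simp
    | cons kv l ih =>
      intro s0
      by_cases hm : m ≤ kv.1 <;> simp [List.foldl_cons, hm, ih] <;> ring
  rw [hfold, PySem.Dict.items_counter]
  have hmm : ((PySem.Set.ofList L).map (fun k => (k, (L.count k : Int)))).map
      (fun kv => if m ≤ kv.1 then kv.2 else 0)
      = (PySem.Set.ofList L).map (fun k => if m ≤ k then (L.count k : Int) else 0) := by
    simp [List.map_map]
  rw [hmm, zero_add, sum_counts_eq_countP L m (PySem.Set.ofList L)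
      (PySem.Set.nodup_ofList L) (fun x hx => (PySem.Set.mem_ofList L x).mpr hx)]

-- on a descending-sorted list the qualifying elements form a prefix: the early-exit
-- prefix count equals the filtered count
theorem prefixCount_eq_countP_of_desc (m : Int) (S : List Int)
    (hs : S.Pairwise (fun a b => b ≤ a)) :
    pvPrefixCount m S = ((S.countP (fun x => m ≤ x) : Nat) : Int) := by
  induction S with
  | nil => simp [pvPrefixCount]
  | cons x rest ih =>
    rcases List.pairwise_cons.mp hs with ⟨hall, hrest⟩
    by_cases hx : x < m
    · have hz : rest.countP (fun x => m ≤ x) = 0 := by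
        apply List.countP_eq_zero.mpr
        intro y hy
        simp only [decide_eq_true_eq]
        exact fun hmy => absurd (lt_of_le_of_lt (le_trans hmy (hall y hy)) hx) (lt_irrefl m)
      have hxm : ¬ m ≤ x := not_le.mpr hx
      simp [pvPrefixCount, hx, hxm, hz]
    · have hmx : m ≤ x := not_lt.mp hx
      simp [pvPrefixCount, hx, hmx, ih hrest]

-- B's per-color value equals the direct filtered count of the sizes
theorem pvShared_eq_countP (m : Int) (af : List (String × List Int)) :
    pvShared m af
      = (((af.map (fun p => PySem.List.len p.2)).countP (fun x => m ≤ x) : Nat) : Int) := by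
  unfold pvShared
  rw [prefixCount_eq_countP_of_desc m _ (PySem.List.sorted_pairwise_rev _ _),
    (PySem.List.sorted_perm (af.map (fun p => PySem.List.len p.2)) (fun x => x) true).countP_eq]

-- ===== VERDICT (by name: the statement is the Claim_ definition above) =====
theorem count_shared_flags_spec : Claim_equal_count_shared_flags := by
  intro gd m _
  show count_shared_flags gd m = count_shared_flags_alt gd m
  unfold count_shared_flags count_shared_flags_alt
  rw [PySem.List.foldl_append_singleton_eq_map]
  apply List.map_congr_left
  intro gc _
  rw [PySem.List.foldl_append_singleton_eq_map]
  refine congrArg (fun z => (gc.1, z)) ?_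
  apply List.map_congr_left
  intro ca _
  simp only [counter_loop_eq_countP, pvShared_eq_countP]
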